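-- pv_equiv track=rewrite | github.com/reilost/appspider | appspider/spiders/wenshucourt/wenshucore.py | StrToLong2
-- ===== SOURCE A (Python) =====
-- def StrToLong2(s, i):
--     v10 = i
--     v4 = v10
--     v7 = 1
--     v6 = len(s)
--     while v7 < v6:
--         v4 += (v10 + v7 + (ord(s[v7]) << (v7 & 0xf)) - ord(s[v7]))
--         v7 += 1
--     return v4
-- ===== SOURCE B (Python) =====
-- def StrToLong2(s, i):
--     n = len(s)
--     if n == 0:
--         return i
--     # Bucket the character contributions by shift class k & 0xf (16 classes),
--     # then combine each bucket once with its weight (1 << r) - 1; the i- and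
--     # index-dependent parts of the sum are computed in closed form.
--     buckets = [0] * 16
--     for k, ch in enumerate(s):
--         if k:
--             buckets[k & 0xf] += ord(ch)
--     total = n * i + (n - 1) * n // 2
--     for r, b in enumerate(buckets):
--         total += b * ((1 << r) - 1)
--     return total
-- ===== Notes on version B (the rewrite author's own statement) =====
-- stated objective: faster
-- what changed: Instead of accumulating one running hash value per character, B buckets the character ordinals into 16 shift-class sums (index mod 16), combines the buckets once with their weights (1<<r)-1, and adds the i- and index-dependent part in closed form (n*i + (n-1)*n//2); only 16 big multiplications are needed and the per-character work is a small-int add.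
import Mathlib
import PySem

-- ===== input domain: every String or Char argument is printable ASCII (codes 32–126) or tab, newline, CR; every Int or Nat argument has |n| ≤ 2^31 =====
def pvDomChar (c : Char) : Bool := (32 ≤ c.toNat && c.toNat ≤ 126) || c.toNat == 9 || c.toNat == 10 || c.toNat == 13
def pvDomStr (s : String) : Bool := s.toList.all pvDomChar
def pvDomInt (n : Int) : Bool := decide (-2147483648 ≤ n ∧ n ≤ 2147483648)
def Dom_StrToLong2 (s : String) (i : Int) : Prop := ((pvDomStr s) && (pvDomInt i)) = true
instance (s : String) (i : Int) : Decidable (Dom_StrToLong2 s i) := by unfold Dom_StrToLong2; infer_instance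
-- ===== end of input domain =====

-- B buckets character ordinals into 16 shift-class sums combined once with their weights,
-- and computes the i- and index-dependent part in closed form (objective: faster, constant-factor: per-character work shrinks to a small-int bucket add).

-- ===== PORT A =====
-- while v7 < v6 with v7 += 1 is the fold over pyRange 1 v6 1; v7 & 0xf = v7 % 16 and
-- x << e = x * 2^e, exact since v7 ≥ 1 here; the index v7 is always in range, so the
-- pyGetD default is never used.
def StrToLong2 (s : String) (i : Int) : Int :=
  let cs := s.toList
  let v6 : Int := PySem.Str.len s
  (PySem.List.pyRange 1 v6 1).foldl
    (fun v4 v7 =>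
      v4 + (i + v7 + ((PySem.List.pyGetD cs v7 ' ').toNat : Int) * 2 ^ ((v7 % 16).toNat)
        - ((PySem.List.pyGetD cs v7 ' ').toNat : Int))) i

-- ===== PORT B =====
-- k & 0xf = k % 16 (k ≥ 0 from enumerate) and 1 << r = 2^r; the bucket index is always
-- < 16 = length of the bucket list, so the getD default 0 is never used.
def StrToLong2_alt (s : String) (i : Int) : Int :=
  let cs := s.toList
  let n : Int := PySem.Str.len s
  if n = 0 then i
  else
    let buckets := (PySem.List.enumerate cs).foldl
      (fun (b : List Int) kc =>
        if kc.1 ≠ 0 then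
          b.set (kc.1 % 16).toNat (b.getD (kc.1 % 16).toNat 0 + (kc.2.toNat : Int))
        else b)
      (List.replicate 16 0)
    (PySem.List.enumerate buckets).foldl
      (fun total rb => total + rb.2 * (2 ^ rb.1.toNat - 1))
      (n * i + PySem.Int.floordiv ((n - 1) * n) 2)

-- ===== PRECONDITION & SPEC =====
def Spec_StrToLong2 (s : String) (i : Int) (out : Int) : Prop := out = StrToLong2_alt s i
instance (s : String) (i : Int) (out : Int) : Decidable (Spec_StrToLong2 s i out) := by unfold Spec_StrToLong2; infer_instance

-- ===== CLAIM (what is proved, stated in full; the proofs are below) =====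
def Claim_equal_StrToLong2 : Prop := ∀ (s : String) (i : Int), Dom_StrToLong2 s i → Spec_StrToLong2 s i (StrToLong2 s i)

-- ===== LEMMAS AND PROOFS =====

-- weighted total of a bucket list whose first slot carries enumerate index st
def pvBW (st : Nat) (b : List Int) : Int :=
  ((PySem.List.enumerate b (st : Int)).map (fun rb => rb.2 * (2 ^ rb.1.toNat - 1))).sum

theorem pvBW_cons (st : Nat) (x : Int) (xs : List Int) :
    pvBW st (x :: xs) = x * (2 ^ st - 1) + pvBW (st + 1) xs := by
  simp [pvBW, PySem.List.enumerate_cons]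

-- adding v into slot r shifts the weighted total by v * (2^(st+r) - 1)
theorem pvBW_set (b : List Int) (r : Nat) (v : Int) (st : Nat) (h : r < b.length) :
    pvBW st (b.set r (b.getD r 0 + v)) = pvBW st b + v * (2 ^ (st + r) - 1) := by
  induction b generalizing r st with
  | nil => simp at h
  | cons x xs ih =>
    cases r with
    | zero => simp [List.getD, pvBW_cons]; ring
    | succ r =>
      simp only [List.set, List.getD_cons_succ, pvBW_cons]
      rw [ih r (st + 1) (by simpa using h)]
      ring

-- A's loop splits into the index-independent char sum plus the i and index sums.
theorem loopA_split (o : Int → Int) (i : Int) (n : Nat) (hn : 1 ≤ n) (v : Int) :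
    (PySem.List.pyRange 1 (n : Int) 1).foldl
      (fun v4 v7 => v4 + (i + v7 + o v7 * 2 ^ ((v7 % 16).toNat) - o v7)) v
    = v + ((n : Int) - 1) * i
      + (PySem.List.pyRange 1 (n : Int) 1).sum
      + ((PySem.List.pyRange 1 (n : Int) 1).map
          (fun k => o k * (2 ^ ((k % 16).toNat) - 1))).sum := by
  induction n, hn using Nat.le_induction with
  | base => simp [PySem.List.pyRange_one_eq_nil]
  | succ n hn ih =>
    have h : PySem.List.pyRange 1 ((n : Int) + 1) 1
        = PySem.List.pyRange 1 (n : Int) 1 ++ [(n : Int)] := by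
      exact PySem.List.pyRange_one_succ_right (by exact_mod_cast hn)
    push_cast
    rw [h, List.foldl_append, List.map_append, List.sum_append, List.sum_append, ih]
    simp [List.foldl]
    ring

theorem sum_range_twice (n : Nat) (hn : 1 ≤ n) :
    2 * (PySem.List.pyRange 1 (n : Int) 1).sum
    = ((n : Int) - 1) * (n : Int) := by
  induction n, hn using Nat.le_induction with
  | base => simp [PySem.List.pyRange_one_eq_nil]
  | succ n hn ih =>
    have h : PySem.List.pyRange 1 ((n : Int) + 1) 1
        = PySem.List.pyRange 1 (n : Int) 1 ++ [(n : Int)] := by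
      exact PySem.List.pyRange_one_succ_right (by exact_mod_cast hn)
    push_cast
    rw [h, List.sum_append]
    simp
    linear_combination ih

-- B's bucket list after processing the first m indices
def pvBuckets (cs : List Char) (m : Nat) : List Int :=
  (PySem.List.pyRange 0 (m : Int) 1).foldl
    (fun (b : List Int) j =>
      if j ≠ 0 then
        b.set ((j % 16).toNat)
          (b.getD ((j % 16).toNat) 0 + ((PySem.List.pyGetD cs j ' ').toNat : Int))
      else b)
    (List.replicate 16 0)

theorem pvBuckets_length (cs : List Char) (m : Nat) : (pvBuckets cs m).length = 16 := by
  induction m with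
  | zero => simp [pvBuckets, PySem.List.pyRange_one_eq_nil]
  | succ m ih =>
    have h0 : PySem.List.pyRange 0 ((m : Int) + 1) 1
        = PySem.List.pyRange 0 (m : Int) 1 ++ [(m : Int)] := by
      exact PySem.List.pyRange_one_succ_right (by positivity)
    unfold pvBuckets at *
    push_cast
    rw [h0, List.foldl_append]
    simp only [List.foldl]
    split
    · rw [List.length_set]; exact ih
    · exact ih

-- invariant of B's bucket-filling loop: the weighted bucket total is A's char sum
theorem pvBuckets_val (cs : List Char) (m : Nat) :
    pvBW 0 (pvBuckets cs m)
    = ((PySem.List.pyRange 1 (m : Int) 1).map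
        (fun k => ((PySem.List.pyGetD cs k ' ').toNat : Int)
          * (2 ^ ((k % 16).toNat) - 1))).sum := by
  induction m with
  | zero =>
    rw [PySem.List.pyRange_one_eq_nil (by norm_num)]
    simp [pvBuckets, PySem.List.pyRange_one_eq_nil]
    decide
  | succ m ih =>
    have h0 : PySem.List.pyRange 0 ((m : Int) + 1) 1
        = PySem.List.pyRange 0 (m : Int) 1 ++ [(m : Int)] := by
      exact PySem.List.pyRange_one_succ_right (by positivity)
    have hbk : pvBuckets cs (m + 1)
        = (fun (b : List Int) j =>
            if j ≠ 0 then
              b.set ((j % 16).toNat)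
                (b.getD ((j % 16).toNat) 0 + ((PySem.List.pyGetD cs j ' ').toNat : Int))
            else b) (pvBuckets cs m) (m : Int) := by
      unfold pvBuckets
      push_cast
      rw [h0, List.foldl_append]
      simp [List.foldl]
    by_cases hm : m = 0
    · subst hm
      rw [hbk]
      simp
      have : pvBuckets cs 0 = List.replicate 16 0 := by
        simp [pvBuckets, PySem.List.pyRange_one_eq_nil]
      rw [this]
      decide
    · have h1 : PySem.List.pyRange 1 ((m : Int) + 1) 1
          = PySem.List.pyRange 1 (m : Int) 1 ++ [(m : Int)] := by
        exact PySem.List.pyRange_one_succ_right (by omega)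
      push_cast
      rw [h1, List.map_append, List.sum_append, hbk]
      have hne : ((m : Int) ≠ 0) := by exact_mod_cast hm
      simp only [hne, ne_eq, not_false_iff, if_pos]
      have hr : (((m : Int) % 16).toNat) < 16 := by omega
      rw [pvBW_set _ _ _ _ (by rw [pvBuckets_length]; exact hr), ih]
      simp

-- ===== VERDICT (by name: the statement is the Claim_ definition above) =====
theorem StrToLong2_spec : Claim_equal_StrToLong2 := by
  intro s i _
  unfold Spec_StrToLong2 StrToLong2 StrToLong2_alt
  simp only [PySem.Str.len_eq]
  set cs := s.toList with hcs
  by_cases h0 : (cs.length : Int) = 0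
  · rw [if_pos h0, PySem.List.pyRange_one_eq_nil (by omega)]
    simp
  · rw [if_neg h0]
    have hn : 1 ≤ cs.length := by omega
    rw [loopA_split (fun k => ((PySem.List.pyGetD cs k ' ').toNat : Int)) i cs.length hn i]
    rw [PySem.List.enumerate_eq_map_pyRange (d := ' '), List.foldl_map]
    have hbk : (PySem.List.pyRange 0 (PySem.List.len cs) 1).foldl
        (fun (b : List Int) j =>
          if j ≠ 0 then
            b.set ((j % 16).toNat)
              (b.getD ((j % 16).toNat) 0 + ((PySem.List.pyGetD cs j ' ').toNat : Int))
          else b)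
        (List.replicate 16 0) = pvBuckets cs cs.length := by
      simp [pvBuckets]
    rw [hbk, PySem.List.foldl_add]
    have hC := pvBuckets_val cs cs.length
    unfold pvBW at hC
    push_cast at hC
    rw [hC]
    have h2 := sum_range_twice cs.length hn
    set S := (PySem.List.pyRange 1 (cs.length : Int) 1).sum with hS
    have hfd : PySem.Int.floordiv (((cs.length : Int) - 1) * (cs.length : Int)) 2 = S := by
      rw [PySem.Int.floordiv_eq_ediv_of_pos (by norm_num)]
      set P := ((cs.length : Int) - 1) * (cs.length : Int)
      omega
    rw [hfd]
    ring
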